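-- pv_equiv track=rewrite | github.com/HaotianFrankZhang/Allocate-Protein-Hinges | PolB/Results/structure_demo/CheckLigands/class_readPDB.py | findMolPosition
-- ===== SOURCE A (Python) =====
-- def reverseStr(posiblePosition):
--     posiblePosition = list(posiblePosition)
--     posiblePosition.reverse()
--     posiblePosition = ''.join(posiblePosition)
--     return posiblePosition
--
-- def findMolPosition(line, pos):
--     posiblePosition = line[pos - 1]
--     posiblePosition = reverseStr(posiblePosition)
--     # print ('pos position', posiblePosition)
--
--     number = ''
--     rest = ''
--     isPos = True
--     for char in posiblePosition:
--         if char.isnumeric() and isPos: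
--             number += char
--         else:
--             rest += char
--             isPos = False
--     return reverseStr(number), rest
-- ===== SOURCE B (Python) =====
-- def findMolPosition(line, pos):
--     rev = line[pos - 1][::-1]
--     i = 0
--     while i < len(rev) and rev[i].isnumeric():
--         i += 1
--     return rev[:i][::-1], rev[i:]
-- ===== Notes on version B (the rewrite author's own statement) =====
-- stated objective: simpler
-- what changed: Replaces the char-routing loop with two accumulators and an isPos flag by a boundary search (advance an index over the reversed string while chars are numeric) followed by two slices.
import Mathlib
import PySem

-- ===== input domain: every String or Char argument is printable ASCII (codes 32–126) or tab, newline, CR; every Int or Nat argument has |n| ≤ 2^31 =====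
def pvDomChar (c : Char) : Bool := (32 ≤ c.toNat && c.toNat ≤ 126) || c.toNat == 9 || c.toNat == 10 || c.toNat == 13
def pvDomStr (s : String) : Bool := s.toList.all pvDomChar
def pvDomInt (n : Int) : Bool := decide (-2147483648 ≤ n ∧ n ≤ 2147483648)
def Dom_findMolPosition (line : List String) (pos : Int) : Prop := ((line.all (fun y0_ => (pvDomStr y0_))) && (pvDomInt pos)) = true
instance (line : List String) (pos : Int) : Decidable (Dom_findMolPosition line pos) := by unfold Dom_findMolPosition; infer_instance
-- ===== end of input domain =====

-- B replaces A's char-routing loop (two accumulators + isPos flag) by a boundary search over the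
-- reversed string followed by two slices; same return values on Pre_ (where A's indexing succeeds).
-- On the ASCII domain Dom_, str.isnumeric coincides with str.isdigit, ported as PySem.Chars.isdigit (exact here).

-- ===== PORT A =====
-- reverseStr: list(s); .reverse(); ''.join
def reverseStrA (s : String) : String := String.ofList s.toList.reverse

-- the body of A's for-loop: route char into number or rest, dropping the isPos flag on the first non-digit
def stepA (acc : List Char × List Char × Bool) (char : Char) : List Char × List Char × Bool :=
  if PySem.Chars.isdigit char && acc.2.2 then (acc.1 ++ [char], acc.2.1, acc.2.2)
  else (acc.1, acc.2.1 ++ [char], false)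

def findMolPosition (line : List String) (pos : Int) : String × String :=
  let posiblePosition := PySem.List.pyGetD line (pos - 1) ""   -- line[pos-1]; Pre_ makes it in range
  let posiblePosition := reverseStrA posiblePosition
  let st := posiblePosition.toList.foldl stepA ([], [], true)
  (reverseStrA (String.ofList st.1), String.ofList st.2.1)

-- ===== PORT B =====
-- i = 0; while i < len(rev) and rev[i].isnumeric(): i += 1   (structural recursion over rev)
def boundaryB : List Char → Nat
  | [] => 0
  | c :: cs => if PySem.Chars.isdigit c then boundaryB cs + 1 else 0

def findMolPosition_alt (line : List String) (pos : Int) : String × String :=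
  let rev := (PySem.List.pyGetD line (pos - 1) "").toList.reverse   -- line[pos-1][::-1]
  let i := boundaryB rev
  (String.ofList (rev.take i).reverse, String.ofList (rev.drop i))          -- rev[:i][::-1], rev[i:]

-- ===== PRECONDITION & SPEC =====
-- Pre_ excludes exactly the inputs where line[pos-1] raises IndexError.
def Pre_findMolPosition (line : List String) (pos : Int) : Prop :=
  PySem.Raise.InRange line.length (pos - 1)
instance (line : List String) (pos : Int) : Decidable (Pre_findMolPosition line pos) := by unfold Pre_findMolPosition; infer_instance

def pvWitness_findMolPosition : List String × Int := (["ABC12", "X"], 1)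

def Spec_findMolPosition (line : List String) (pos : Int) (out : String × String) : Prop := out = findMolPosition_alt line pos
instance (line : List String) (pos : Int) (out : String × String) : Decidable (Spec_findMolPosition line pos out) := by unfold Spec_findMolPosition; infer_instance

-- ===== CLAIM (what is proved, stated in full; the proofs are below) =====
def Claim_equal_findMolPosition : Prop := ∀ (line : List String) (pos : Int), Dom_findMolPosition line pos → Pre_findMolPosition line pos → Spec_findMolPosition line pos (findMolPosition line pos)

-- ===== LEMMAS AND PROOFS =====

-- A's loop once the flag has dropped: everything goes to rest
theorem foldA_false (l n r : List Char) :
    l.foldl stepA (n, r, false) = (n, r ++ l, false) := by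
  induction l generalizing r with
  | nil => simp
  | cons c cs ih =>
    rw [List.foldl_cons, show stepA (n, r, false) c = (n, r ++ [c], false) from by simp [stepA], ih]
    simp

-- A's loop with the flag up: takeWhile/dropWhile characterisation
theorem foldA_true (l n r : List Char) :
    l.foldl stepA (n, r, true)
    = (n ++ l.takeWhile PySem.Chars.isdigit, r ++ l.dropWhile PySem.Chars.isdigit,
       l.all PySem.Chars.isdigit) := by
  induction l generalizing n r with
  | nil => simp
  | cons c cs ih =>
    by_cases h : PySem.Chars.isdigit c = true
    · rw [List.foldl_cons, show stepA (n, r, true) c = (n ++ [c], r, true) from by simp [stepA, h], ih]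
      simp [h]
    · rw [List.foldl_cons, show stepA (n, r, true) c = (n, r ++ [c], false) from by simp [stepA, h],
        foldA_false]
      simp [h]

theorem take_boundaryB (l : List Char) : l.take (boundaryB l) = l.takeWhile PySem.Chars.isdigit := by
  induction l with
  | nil => rfl
  | cons c cs ih =>
    by_cases h : PySem.Chars.isdigit c = true <;>
      simp [boundaryB, h, ih]

theorem drop_boundaryB (l : List Char) : l.drop (boundaryB l) = l.dropWhile PySem.Chars.isdigit := by
  induction l with
  | nil => rfl
  | cons c cs ih =>
    by_cases h : PySem.Chars.isdigit c = true <;>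
      simp [boundaryB, h, ih]

-- ===== VERDICT (by name: the statement is the Claim_ definition above) =====
theorem findMolPosition_spec : Claim_equal_findMolPosition := by
  intro line pos _ _
  unfold Spec_findMolPosition findMolPosition findMolPosition_alt reverseStrA
  simp only [String.toList_ofList, foldA_true, take_boundaryB, drop_boundaryB, List.nil_append]
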